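-- pv_equiv track=rewrite | github.com/Manty-K/fai-02 | 03/main.py | diag2Satisfied
-- ===== SOURCE A (Python) =====
-- def diag2Satisfied(gs)-> bool:
--     mylist = []
--
--     for i in range(2):
--         tplist = []
--         for g in gs:
--             if(g[0] + g[1] == 2) and i == g[2]:
--                 tplist.append(g)
--         mylist.append(tplist)
--
--     for ml in mylist:
--         if len(ml) == 3:
--             return True
--     return False
-- ===== SOURCE B (Python) =====
-- def diag2Satisfied(gs) -> bool:
--     c0 = 0
--     c1 = 0
--     for g in gs:
--         if g[0] + g[1] == 2:
--             if g[2] == 0: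
--                 c0 += 1
--             elif g[2] == 1:
--                 c1 += 1
--     return c0 == 3 or c1 == 3
-- ===== Notes on version B (the rewrite author's own statement) =====
-- stated objective: simpler
-- what changed: One pass maintaining two integer counters instead of building two lists in a double loop over gs and then scanning them for length 3.
import Mathlib
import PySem

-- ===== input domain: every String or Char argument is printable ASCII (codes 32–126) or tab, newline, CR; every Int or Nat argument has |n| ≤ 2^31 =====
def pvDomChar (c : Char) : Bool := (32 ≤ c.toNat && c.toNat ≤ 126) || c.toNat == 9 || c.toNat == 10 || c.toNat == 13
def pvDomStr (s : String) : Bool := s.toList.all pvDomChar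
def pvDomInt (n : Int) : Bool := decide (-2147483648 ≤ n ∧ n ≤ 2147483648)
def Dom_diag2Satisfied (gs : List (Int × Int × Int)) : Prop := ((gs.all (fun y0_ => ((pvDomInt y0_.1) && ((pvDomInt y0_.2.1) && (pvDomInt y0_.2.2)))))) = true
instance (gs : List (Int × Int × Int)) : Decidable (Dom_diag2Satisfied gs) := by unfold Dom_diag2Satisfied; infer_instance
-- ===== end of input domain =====

-- B replaces A's two-pass list-building with a single pass keeping two integer counters (simpler).


-- ===== PORT A =====
-- inner loop: tplist built by appending each g with g[0]+g[1]==2 and i==g[2]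
def diag2TpList (i : Int) (gs : List (Int × Int × Int)) : List (Int × Int × Int) :=
  gs.foldl (fun tplist g => if g.1 + g.2.1 == 2 && i == g.2.2 then tplist ++ [g] else tplist) []

def diag2Satisfied (gs : List (Int × Int × Int)) : Bool :=
  -- for i in range(2): mylist.append(tplist)
  let mylist := (PySem.List.pyRange 0 2 1).foldl (fun ml i => ml ++ [diag2TpList i gs]) []
  -- for ml in mylist: if len(ml) == 3: return True ; return False
  mylist.any (fun ml => ml.length == 3)

-- ===== PORT B =====
-- loop body of B's single pass (the if/elif updating the two counters)
def diag2Step (c : Int × Int) (g : Int × Int × Int) : Int × Int :=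
  if g.1 + g.2.1 == 2 then
    if g.2.2 == 0 then (c.1 + 1, c.2)
    else if g.2.2 == 1 then (c.1, c.2 + 1)
    else c
  else c

def diag2Satisfied_alt (gs : List (Int × Int × Int)) : Bool :=
  let c := gs.foldl diag2Step (0, 0)
  c.1 == 3 || c.2 == 3

-- ===== PRECONDITION & SPEC =====
def Spec_diag2Satisfied (gs : List (Int × Int × Int)) (out : Bool) : Prop := out = diag2Satisfied_alt gs
instance (gs : List (Int × Int × Int)) (out : Bool) : Decidable (Spec_diag2Satisfied gs out) := by unfold Spec_diag2Satisfied; infer_instance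

-- ===== CLAIM (what is proved, stated in full; the proofs are below) =====
def Claim_equal_diag2Satisfied : Prop := ∀ (gs : List (Int × Int × Int)), Dom_diag2Satisfied gs → Spec_diag2Satisfied gs (diag2Satisfied gs)

-- ===== LEMMAS AND PROOFS =====

lemma diag2Counters_eq (gs : List (Int × Int × Int)) (c : Int × Int) :
    gs.foldl diag2Step c =
      (c.1 + (gs.countP (fun g => g.1 + g.2.1 == 2 && (0 : Int) == g.2.2) : Int),
       c.2 + (gs.countP (fun g => g.1 + g.2.1 == 2 && (1 : Int) == g.2.2) : Int)) := by
  induction gs generalizing c with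
  | nil => simp
  | cons g gs ih =>
    rw [List.foldl_cons, ih, List.countP_cons, List.countP_cons]
    simp only [diag2Step, Prod.mk.injEq]
    by_cases h2 : g.1 + g.2.1 = 2
    · by_cases h0 : g.2.2 = 0
      · simp only [h2, h0]
        simp
        omega
      · by_cases h1 : g.2.2 = 1
        · simp only [h2, h1]
          simp
          omega
        · simp [h2, h0, h1, Ne.symm h0, Ne.symm h1]
    · simp [h2]

lemma diag2TpList_length (i : Int) (gs : List (Int × Int × Int)) :
    (diag2TpList i gs).length = gs.countP (fun g => g.1 + g.2.1 == 2 && i == g.2.2) := by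
  unfold diag2TpList
  rw [PySem.List.foldl_append_if_eq_filter]
  simp [List.countP_eq_length_filter]

-- ===== VERDICT (by name: the statement is the Claim_ definition above) =====
theorem diag2Satisfied_spec : Claim_equal_diag2Satisfied := by
  intro gs _
  unfold Spec_diag2Satisfied diag2Satisfied diag2Satisfied_alt
  have hr : PySem.List.pyRange 0 2 1 = [0, 1] := by decide
  rw [hr, diag2Counters_eq]
  rw [Bool.eq_iff_iff]
  simp [diag2TpList_length]
  omega
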